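-- pv_equiv track=rewrite | github.com/guillaume-bouvier/robe-mbam-2025 | main_4.py | add_zeros
-- ===== SOURCE A (Python) =====
-- def add_zeros(input_list, num_zeros):
--     try:
--         first_zero_index = input_list.index(0)
--     except ValueError:
--         min_value = min(input_list)
--         first_zero_index = input_list.index(min_value)
--
--     for _ in range(num_zeros):
--         input_list.insert(first_zero_index, 0)
--     return input_list
-- ===== SOURCE B (Python) =====
-- def add_zeros(input_list, num_zeros):
--     # Index-free rebuild: pick the target VALUE (0 if present, else the minimum),
--     # then one forward pass re-emits the elements, emitting the block of zeros
--     # just before the first element equal to the target. No position is ever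
--     # computed and nothing is insert()ed or spliced.
--     target = 0 if 0 in input_list else min(input_list)
--     out = []
--     emitted = False
--     for v in input_list:
--         if not emitted and v == target:
--             out.extend([0] * num_zeros)
--             emitted = True
--         out.append(v)
--     input_list[:] = out  # keep A's in-place mutation observable to the caller
--     return input_list
-- ===== Notes on version B (the rewrite author's own statement) =====
-- stated objective: faster
-- what changed: B never computes an insertion index and never inserts: it picks a target VALUE (0 if present, else the minimum) and rebuilds the list in one emitting pass that outputs the zero block just before the first element equal to that value, replacing A's index search plus num_zeros repeated O(n) insert() calls.
import Mathlib
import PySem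

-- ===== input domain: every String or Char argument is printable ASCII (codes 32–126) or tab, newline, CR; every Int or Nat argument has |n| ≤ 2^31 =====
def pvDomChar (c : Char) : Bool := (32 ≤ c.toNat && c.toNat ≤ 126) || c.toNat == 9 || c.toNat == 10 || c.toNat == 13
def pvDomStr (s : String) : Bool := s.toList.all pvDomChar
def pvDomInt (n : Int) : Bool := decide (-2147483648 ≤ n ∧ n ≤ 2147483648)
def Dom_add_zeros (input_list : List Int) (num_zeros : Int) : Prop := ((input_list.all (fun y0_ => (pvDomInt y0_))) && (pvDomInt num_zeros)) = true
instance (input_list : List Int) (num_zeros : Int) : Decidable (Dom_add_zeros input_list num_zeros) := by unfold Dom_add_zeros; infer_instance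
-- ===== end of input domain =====

-- B drops A's index search + num_zeros repeated insert() calls for an index-free
-- one-pass rebuild that emits the zero block before the first element equal to the
-- target value (0 if present, else the minimum); both A and B mutate the argument
-- in place in Python — the equivalence proved here is about the returned value.

-- ===== PORT A =====
def add_zeros (input_list : List Int) (num_zeros : Int) : List Int :=
  let first_zero_index : Nat :=
    match PySem.List.index? input_list 0 with
    | some i => i
    | none =>
      -- min([]) raises ValueError: excluded by Pre_; the .getD defaults are unreachable there
      let min_value : Int := (PySem.List.min? input_list (fun x => x)).getD 0
      (PySem.List.index? input_list min_value).getD 0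
  (PySem.List.pyRange 0 num_zeros 1).foldl
    (fun acc _ => PySem.List.insert acc (first_zero_index : Int) 0) input_list

-- ===== PORT B =====
def add_zeros_alt (input_list : List Int) (num_zeros : Int) : List Int :=
  -- target = 0 if 0 in input_list else min(input_list); min([]) raises (outside Pre_)
  let target : Int :=
    if input_list.contains 0 then 0
    else (PySem.List.min? input_list (fun x => x)).getD 0
  -- the emitting pass: state (out, emitted)
  (input_list.foldl
    (fun (st : List Int × Bool) v =>
      if ¬ st.2 ∧ v = target then (st.1 ++ List.replicate num_zeros.toNat 0 ++ [v], true)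
      else (st.1 ++ [v], st.2))
    ([], false)).1

-- ===== PRECONDITION & SPEC =====
-- Pre_ excludes only the empty list, on which A (and B) raise ValueError.
def Pre_add_zeros (input_list : List Int) (num_zeros : Int) : Prop := input_list ≠ []
instance (input_list : List Int) (num_zeros : Int) : Decidable (Pre_add_zeros input_list num_zeros) := by unfold Pre_add_zeros; infer_instance
def pvWitness_add_zeros : List Int × Int := ([3, 1, 2, 1], 2)

def Spec_add_zeros (input_list : List Int) (num_zeros : Int) (out : List Int) : Prop := out = add_zeros_alt input_list num_zeros
instance (input_list : List Int) (num_zeros : Int) (out : List Int) : Decidable (Spec_add_zeros input_list num_zeros out) := by unfold Spec_add_zeros; infer_instance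

-- ===== CLAIM (what is proved, stated in full; the proofs are below) =====
def Claim_equal_add_zeros : Prop := ∀ (input_list : List Int) (num_zeros : Int), Dom_add_zeros input_list num_zeros → Pre_add_zeros input_list num_zeros → Spec_add_zeros input_list num_zeros (add_zeros input_list num_zeros)

-- ===== LEMMAS AND PROOFS =====

-- the index A computes, as a standalone value
def aIndex (xs : List Int) : Nat :=
  match PySem.List.index? xs 0 with
  | some i => i
  | none =>
    let min_value : Int := (PySem.List.min? xs (fun x => x)).getD 0
    (PySem.List.index? xs min_value).getD 0

-- a loop over an ignored counter is function iteration
theorem foldl_ignore_iterate {α β : Type} (f : α → α) (l : List β) (init : α) :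
    l.foldl (fun acc _ => f acc) init = f^[l.length] init := by
  induction l generalizing init with
  | nil => rfl
  | cons x t ih => simp [List.foldl, ih, Function.iterate_succ_apply]

-- m repeated inserts of 0 at a fixed valid position = splice of m zeros at that position
theorem iterate_insert_eq_splice (xs : List Int) (idx : Nat) (h : idx ≤ xs.length) (m : Nat) :
    (fun acc => PySem.List.insert acc (idx : Int) 0)^[m] xs
      = xs.take idx ++ List.replicate m 0 ++ xs.drop idx := by
  induction m with
  | zero => simp
  | succ m ih =>
    rw [Function.iterate_succ_apply', ih]
    have hlen : (xs.take idx).length = idx := by simp [h]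
    have hle : idx ≤ (xs.take idx ++ (List.replicate m 0 ++ xs.drop idx)).length := by
      simp [hlen]
    have key : ∀ (a b : List Int), a.length = idx →
        List.take idx (a ++ b) = a ∧ List.drop idx (a ++ b) = b := by
      intro a b ha
      rw [← ha]
      exact ⟨List.take_left, List.drop_left⟩
    obtain ⟨k1, k2⟩ := key (xs.take idx) (List.replicate m 0 ++ xs.drop idx) hlen
    rw [List.append_assoc, PySem.List.insert_natCast _ idx 0 hle, k1, k2]
    simp [List.replicate_succ]

-- A's index is within the list
theorem aIndex_le (xs : List Int) : aIndex xs ≤ xs.length := by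
  unfold aIndex
  cases hz : PySem.List.index? xs 0 with
  | some k =>
    obtain ⟨hk, -⟩ := PySem.List.getElem_of_index?_eq_some hz
    simpa using hk.le
  | none =>
    simp only
    cases hm : PySem.List.index? xs ((PySem.List.min? xs (fun x => x)).getD 0) with
    | none => simp
    | some k =>
      obtain ⟨hk, -⟩ := PySem.List.getElem_of_index?_eq_some hm
      simpa using hk.le

-- once emitted, B's pass just copies the rest
theorem foldB_emitted (t0 : Int) (Z : List Int) : ∀ (t out : List Int),
    (t.foldl
      (fun (st : List Int × Bool) v =>
        if ¬ st.2 ∧ v = t0 then (st.1 ++ Z ++ [v], true)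
        else (st.1 ++ [v], st.2))
      (out, true)) = (out ++ t, true) := by
  intro t
  induction t with
  | nil => intro out; simp
  | cons v t ih =>
    intro out
    rw [List.foldl_cons]
    show List.foldl _
      (if ¬ (true : Bool) = true ∧ v = t0 then (out ++ Z ++ [v], (true : Bool))
       else (out ++ [v], true)) t = _
    rw [if_neg (by simp), ih]
    simp

-- before emission, B's pass splices Z at the first occurrence of the target
theorem foldB_not_emitted (t0 : Int) (Z : List Int) (xs : List Int) :
    ∀ (out : List Int),
    (xs.foldl
      (fun (st : List Int × Bool) v =>
        if ¬ st.2 ∧ v = t0 then (st.1 ++ Z ++ [v], true)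
        else (st.1 ++ [v], st.2))
      (out, false)) =
      match PySem.List.index? xs t0 with
      | some i => (out ++ xs.take i ++ Z ++ xs.drop i, true)
      | none => (out ++ xs, false) := by
  induction xs with
  | nil => intro out; simp [PySem.List.index?, List.idxOf?]
  | cons v t ih =>
    intro out
    rw [List.foldl_cons]
    by_cases hv : v = t0
    · rw [hv, PySem.List.index?_cons_self]
      show List.foldl _
        (if ¬ (false : Bool) = true ∧ t0 = t0 then (out ++ Z ++ [t0], (true : Bool))
         else (out ++ [t0], false)) t = _
      rw [if_pos (by simp), foldB_emitted t0 Z t (out ++ Z ++ [t0])]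
      simp
    · rw [PySem.List.index?_cons_of_ne (x := v) (xs := t) hv]
      show List.foldl _
        (if ¬ (false : Bool) = true ∧ v = t0 then (out ++ Z ++ [v], (true : Bool))
         else (out ++ [v], false)) t = _
      rw [if_neg (by simp [hv]), ih (out ++ [v])]
      cases PySem.List.index? t t0 with
      | some i => simp
      | none => simp

-- B's target occurs in any nonempty list, at position aIndex
theorem index?_target (xs : List Int) (hne : xs ≠ []) :
    PySem.List.index?
      xs (if xs.contains 0 then 0
          else (PySem.List.min? xs (fun x => x)).getD 0) = some (aIndex xs) := by
  by_cases hc : xs.contains 0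
  · rw [if_pos hc]
    have hmem : (0 : Int) ∈ xs := by simpa using hc
    rcases Option.isSome_iff_exists.mp
      ((PySem.List.index?_isSome_iff xs 0).mpr hmem) with ⟨i, hi⟩
    rw [hi]
    unfold aIndex
    rw [hi]
  · rw [if_neg hc]
    have h0 : (0 : Int) ∉ xs := by simpa using hc
    have hz : PySem.List.index? xs 0 = none :=
      (PySem.List.index?_eq_none_iff xs 0).mpr h0
    cases xs with
    | nil => exact absurd rfl hne
    | cons v t =>
      have hmin : PySem.List.min? (v :: t) (fun x => x) = some (t.foldl min v) :=
        PySem.List.min?_id_cons v t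
      have hmem : t.foldl min v ∈ v :: t := by
        rcases PySem.List.foldl_min_mem t v with h | h
        · rw [h]; exact List.mem_cons_self
        · exact List.mem_cons_of_mem v h
      rcases Option.isSome_iff_exists.mp
        ((PySem.List.index?_isSome_iff (v :: t) (t.foldl min v)).mpr hmem) with ⟨i, hi⟩
      unfold aIndex
      rw [hz, hmin]
      simp only [Option.getD_some]
      rw [hi]
      simp

-- ===== VERDICT (by name: the statement is the Claim_ definition above) =====
theorem add_zeros_spec : Claim_equal_add_zeros := by
  intro xs n _ hpre
  unfold Spec_add_zeros
  have hA : add_zeros xs n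
      = xs.take (aIndex xs) ++ List.replicate n.toNat 0 ++ xs.drop (aIndex xs) := by
    unfold add_zeros
    rw [foldl_ignore_iterate, PySem.List.length_pyRange_one]
    have h0 : ((n : Int) - 0).toNat = n.toNat := by omega
    rw [h0]
    exact iterate_insert_eq_splice xs (aIndex xs) (aIndex_le xs) n.toNat
  have hB : add_zeros_alt xs n
      = xs.take (aIndex xs) ++ List.replicate n.toNat 0 ++ xs.drop (aIndex xs) := by
    unfold add_zeros_alt
    show (List.foldl
        (fun (st : List Int × Bool) v =>
          if ¬ st.2 ∧ v = (if xs.contains 0 then 0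
              else (PySem.List.min? xs (fun x => x)).getD 0) then
            (st.1 ++ List.replicate n.toNat 0 ++ [v], true)
          else (st.1 ++ [v], st.2))
        ([], false) xs).1 = _
    rw [foldB_not_emitted, index?_target xs hpre]
    simp
  rw [hA, hB]
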